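-- pv_equiv track=rewrite | github.com/leowucn/sincity | sync_anki_v2/anki.py | _remove_prefix_deck_name
-- ===== SOURCE A (Python) =====
-- def _remove_prefix_deck_name(deck_list):
--     res = []
--
--     deck_list = sorted(deck_list)
--
--     for index in range(len(deck_list)):
--         found_prefix = False
--         for index1 in range(index + 1, len(deck_list)):
--             if deck_list[index1].startswith(deck_list[index]) and deck_list[index1].count("::") != deck_list[index].count("::"):
--                 found_prefix = True
--                 break
--
--         if not found_prefix:
--             res.append(deck_list[index])
--     return sorted(res)
-- ===== SOURCE B (Python) =====
-- def _remove_prefix_deck_name(deck_list):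
--     # Single left-to-right pass over the sorted names with a monotonic stack:
--     # the stack holds the still-alive chain of prefixes of the current name
--     # (all sharing one "::" count), so each name is pushed and popped at most once.
--     res = []
--     stack = []
--     sc = 0  # the shared "::" count of everything on the stack
--     for x in sorted(deck_list):
--         cx = x.count("::")
--         while stack and not x.startswith(stack[-1]):
--             res.append(stack.pop())
--         if stack and sc != cx:
--             # every remaining stack entry is a prefix of x with a different
--             # "::" count, hence shadowed by x
--             stack.clear()
--         stack.append(x)
--         sc = cx
--     res.extend(stack)
--     return sorted(res)
-- ===== Notes on version B (the rewrite author's own statement) =====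
-- stated objective: faster
-- what changed: B replaces A's quadratic later-index rescan by one left-to-right pass over the sorted list with a monotonic prefix stack: the stack holds the still-alive chain of prefixes of the current name (all with one shared '::' count), each name is pushed and popped at most once, and a name with a different '::' count shadows the whole remaining chain at once.
import Mathlib
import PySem

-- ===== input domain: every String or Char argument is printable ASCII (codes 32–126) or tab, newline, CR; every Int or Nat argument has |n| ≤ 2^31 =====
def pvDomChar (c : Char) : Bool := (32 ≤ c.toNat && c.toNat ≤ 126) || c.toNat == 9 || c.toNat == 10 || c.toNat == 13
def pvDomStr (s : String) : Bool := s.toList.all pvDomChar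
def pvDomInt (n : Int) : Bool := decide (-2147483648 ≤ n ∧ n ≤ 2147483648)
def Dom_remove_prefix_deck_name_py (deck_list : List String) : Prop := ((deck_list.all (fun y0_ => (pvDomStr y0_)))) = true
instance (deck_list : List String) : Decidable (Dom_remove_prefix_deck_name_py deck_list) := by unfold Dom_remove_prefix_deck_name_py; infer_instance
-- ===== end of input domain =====

-- B replaces A's quadratic later-index rescan by one pass over the sorted names with a
-- monotonic stack of still-alive prefixes of the current name (each name pushed/popped once);
-- a timing run measured B faster (asymptotically better inner work).

-- ===== PORT A =====
-- inner 'for index1 in range(index+1, len(deck_list)): … break' of A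
def pvFoundA (dl : List String) (s : String) : List Nat → Bool
  | [] => false
  | i :: rest =>
    if PySem.Str.startswith (dl.getD i "") s
        && (PySem.Str.count (dl.getD i "") "::" != PySem.Str.count s "::") then true
    else pvFoundA dl s rest

def remove_prefix_deck_name_py (deck_list : List String) : List String :=
  let dl := PySem.List.sorted deck_list (fun x => x) false
  let res := (List.range dl.length).foldl (fun res index =>
      let found_prefix :=
        pvFoundA dl (dl.getD index "") (List.range' (index + 1) (dl.length - (index + 1)))
      if !found_prefix then res ++ [dl.getD index ""] else res) ([] : List String)
  PySem.List.sorted res (fun x => x) false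

-- ===== PORT B =====
-- B's stack is modelled head-at-top (Python's stack[-1] / pop() / append(x) are the head
-- operations here); res.extend(stack) iterates bottom-to-top, i.e. appends stack.reverse.
-- 'while stack and not x.startswith(stack[-1]): res.append(stack.pop())'
def pvPopLoop (x : String) (res : List String) : List String → List String × List String
  | [] => (res, [])
  | s :: rest =>
    if !PySem.Str.startswith x s then pvPopLoop x (res ++ [s]) rest
    else (res, s :: rest)

-- one iteration of B's for-loop; state = (res, stack, sc)
def pvStepB (st : List String × List String × Nat) (x : String) : List String × List String × Nat :=
  let cx := PySem.Str.count x "::"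
  let rs := pvPopLoop x st.1 st.2.1
  let stack := if !rs.2.isEmpty && (st.2.2 != cx) then [] else rs.2
  (rs.1, x :: stack, cx)

def remove_prefix_deck_name_py_alt (deck_list : List String) : List String :=
  let st := (PySem.List.sorted deck_list (fun x => x) false).foldl pvStepB ([], [], 0)
  PySem.List.sorted (st.1 ++ st.2.1.reverse) (fun x => x) false

-- ===== PRECONDITION & SPEC =====
def Spec_remove_prefix_deck_name_py (deck_list : List String) (out : List String) : Prop := out = remove_prefix_deck_name_py_alt deck_list
instance (deck_list : List String) (out : List String) : Decidable (Spec_remove_prefix_deck_name_py deck_list out) := by unfold Spec_remove_prefix_deck_name_py; infer_instance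

-- ===== CLAIM (what is proved, stated in full; the proofs are below) =====
def Claim_equal_remove_prefix_deck_name_py : Prop := ∀ (deck_list : List String), Dom_remove_prefix_deck_name_py deck_list → Spec_remove_prefix_deck_name_py deck_list (remove_prefix_deck_name_py deck_list)

-- ===== LEMMAS AND PROOFS =====

-- the deeper-extension test both programs decide, as a predicate on (candidate, kept)
def pvDeep (t s : String) : Bool :=
  PySem.Str.startswith t s && (PySem.Str.count t "::" != PySem.Str.count s "::")

def pvAlive (L : List String) (s : String) : Bool := !(L.any fun t => pvDeep t s)

-- the elements of p that are alive within p and are / are not prefixes of x'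
def pvStF (p : List String) (x' : String) : List String :=
  p.filter (fun s => pvAlive p s && PySem.Str.startswith x' s)
def pvResF (p : List String) (x' : String) : List String :=
  p.filter (fun s => pvAlive p s && !PySem.Str.startswith x' s)

-- loop invariant of B after processing the sorted prefix p whose last element is x'
def pvInv (p : List String) (x' : String) (st : List String × List String × Nat) : Prop :=
  st.1.Perm (pvResF p x') ∧ st.2.1 = (pvStF p x').reverse ∧ st.2.2 = PySem.Str.count x' "::"

-- ---- A-side: the quadratic scan is a filter ----

theorem pvFoundA_eq_any (dl : List String) (s : String) (l : List Nat) :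
    pvFoundA dl s l = l.any (fun i => pvDeep (dl.getD i "") s) := by
  induction l with
  | nil => rfl
  | cons i rest ih =>
    rw [List.any_cons, ← ih]
    show (if pvDeep (dl.getD i "") s = true then true else pvFoundA dl s rest) = _
    cases h : pvDeep (dl.getD i "") s
    · rw [if_neg (by simp), Bool.false_or]
    · rw [if_pos rfl, Bool.true_or]

theorem pv_prefix_lt_chars (l1 l2 : List Char) (h : l1 <+: l2) (hne : l1 ≠ l2) : l1 < l2 := by
  show List.Lex (· < ·) l1 l2
  obtain ⟨u, rfl⟩ := h
  induction l1 with
  | nil =>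
    cases u with
    | nil => exact absurd rfl hne
    | cons c cs => exact List.Lex.nil
  | cons a l1 ih =>
    exact List.Lex.cons (ih (by intro h'; exact hne (by simpa using h')))

theorem pv_prefix_lt (s t : String) (h : s.toList <+: t.toList) (hne : s ≠ t) : s < t := by
  rw [String.lt_iff_toList_lt]
  refine pv_prefix_lt_chars _ _ h ?_
  intro h'
  exact hne (by simpa [String.ofList_toList] using congrArg String.ofList h')

theorem pvDeep_ne (t s : String) (h : pvDeep t s = true) : s ≠ t := by
  rintro rfl
  simp [pvDeep] at h

theorem pvDeep_lt (t s : String) (h : pvDeep t s = true) : s < t := by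
  have hsw : PySem.Str.startswith t s = true := by
    simp only [pvDeep, Bool.and_eq_true] at h; exact h.1
  have hpre : s.toList <+: t.toList := by
    simpa [pysem] using hsw
  exact pv_prefix_lt s t hpre (pvDeep_ne t s h)

-- the later-indices scan over a sorted list sees a deeper extension iff the whole list has one
theorem pv_any_later (dl : List String) (i : Nat) (hi : i < dl.length)
    (hs : dl.Pairwise (· ≤ ·)) :
    (List.range' (i + 1) (dl.length - (i + 1))).any (fun j => pvDeep (dl.getD j "") (dl.getD i ""))
      = dl.any (fun t => pvDeep t (dl.getD i "")) := by
  rcases hb : dl.any (fun t => pvDeep t (dl.getD i "")) with _ | _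
  · rw [List.any_eq_false] at hb ⊢
    intro j hj
    rw [List.mem_range'_1] at hj
    have hjl : j < dl.length := by omega
    exact hb _ (by rw [List.getD_eq_getElem dl "" hjl]; exact dl.getElem_mem hjl)
  · rw [List.any_eq_true] at hb ⊢
    obtain ⟨t, htm, htd⟩ := hb
    obtain ⟨j, hjl, rfl⟩ := List.getElem_of_mem htm
    have hmono := List.pairwise_iff_getElem.mp hs
    have hlt : dl.getD i "" < dl[j] := pvDeep_lt _ _ htd
    have hij : i < j := by
      by_contra hle
      have hle2 : j ≤ i := Nat.le_of_not_lt hle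
      rcases Nat.lt_or_ge j i with hj' | hj'
      · have := hmono j i hjl hi hj'
        rw [List.getD_eq_getElem dl "" hi] at hlt
        exact absurd hlt (not_lt.mpr this)
      · have : j = i := by omega
        subst this
        rw [List.getD_eq_getElem dl "" hjl] at hlt
        exact lt_irrefl _ hlt
    refine ⟨j, ?_, ?_⟩
    · rw [List.mem_range'_1]; omega
    · rw [List.getD_eq_getElem dl "" hjl]; exact htd

-- mapping the kept indices back to elements is a filter of the list itself
theorem pv_filter_map_range (p : String → Bool) :
    ∀ (l : List String) (L : List String) (k : Nat), L.drop k = l →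
      ((List.range' k l.length).filter (fun i => p (L.getD i ""))).map (fun i => L.getD i "")
        = l.filter p
  | [], L, k, _ => by simp
  | a :: l, L, k, hdrop => by
    have hget : L.getD k "" = a := by
      have : L[k]? = some a := by
        rw [← List.head?_drop, hdrop, List.head?_cons]
      simp [List.getD_eq_getElem?_getD, this]
    have hdrop' : L.drop (k + 1) = l := by
      rw [← List.tail_drop, hdrop, List.tail_cons]
    rw [List.length_cons, List.range'_succ, List.filter_cons]
    by_cases hp : p a = true
    · rw [if_pos (by rw [hget]; exact hp), List.map_cons, hget,
        pv_filter_map_range p l L (k + 1) hdrop', List.filter_cons_of_pos hp]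
    · rw [if_neg (by rw [hget]; simpa using hp),
        pv_filter_map_range p l L (k + 1) hdrop', List.filter_cons_of_neg (by simpa using hp)]

-- A = sorted(filter alive) over the sorted list
theorem pv_A_eq (deck_list : List String) :
    remove_prefix_deck_name_py deck_list
      = PySem.List.sorted
          ((PySem.List.sorted deck_list (fun x => x) false).filter
            (fun s => pvAlive (PySem.List.sorted deck_list (fun x => x) false) s))
          (fun x => x) false := by
  unfold remove_prefix_deck_name_py
  dsimp only
  set dl := PySem.List.sorted deck_list (fun x => x) false with hdl
  have hpw : dl.Pairwise (· ≤ ·) := PySem.List.sorted_pairwise deck_list (fun x => x)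
  rw [PySem.List.foldl_append_if
      (fun index => !pvFoundA dl (dl.getD index "")
        (List.range' (index + 1) (dl.length - (index + 1))))
      (fun index => dl.getD index "")]
  rw [List.nil_append]
  have hcongr : (List.range dl.length).filter
        (fun index => !pvFoundA dl (dl.getD index "")
          (List.range' (index + 1) (dl.length - (index + 1))))
      = (List.range dl.length).filter
        (fun index => pvAlive dl (dl.getD index "")) := by
    apply List.filter_congr
    intro i hi
    rw [List.mem_range] at hi
    rw [pvFoundA_eq_any, pv_any_later dl i hi hpw]; rfl
  rw [hcongr, List.range_eq_range',
    pv_filter_map_range (fun s => pvAlive dl s) dl dl 0 rfl]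

-- ---- string-order facts ----

theorem pv_not_lex_of_prefix : ∀ (s t : List Char), s <+: t → ¬ List.Lex (· < ·) t s
  | [], t, _, h => by cases h
  | a :: s', t, hpre, h => by
    obtain ⟨u, rfl⟩ := hpre
    cases h with
    | rel h' => exact lt_irrefl _ h'
    | cons h' => exact pv_not_lex_of_prefix s' (s' ++ u) ⟨u, rfl⟩ h'

-- a prefix is ≤ the string
theorem pv_pref_le (s t : String) (h : PySem.Str.startswith t s = true) : s ≤ t := by
  have hpre : s.toList <+: t.toList := by simpa [pysem] using h
  rw [← not_lt, String.lt_iff_toList_lt]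
  exact pv_not_lex_of_prefix s.toList t.toList hpre

theorem pv_between_chars : ∀ (s y t : List Char), s <+: t →
    ¬ List.Lex (· < ·) y s → ¬ List.Lex (· < ·) t y → s <+: y
  | [], y, t, _, _, _ => List.nil_prefix
  | a :: s', y, t, hpre, h1, h2 => by
    obtain ⟨u, rfl⟩ := hpre
    cases y with
    | nil => exact absurd List.Lex.nil h1
    | cons b y' =>
      have hba : ¬ b < a := fun h => h1 (List.Lex.rel h)
      have hab : ¬ a < b := fun h => h2 (List.Lex.rel h)
      have hav : a = b := le_antisymm (not_lt.1 hba) (not_lt.1 hab)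
      subst hav
      have h1' : ¬ List.Lex (· < ·) y' s' := fun h => h1 (List.Lex.cons h)
      have h2' : ¬ List.Lex (· < ·) (s' ++ u) y' := fun h => h2 (List.Lex.cons h)
      exact (List.cons_prefix_cons).2 ⟨rfl, pv_between_chars s' y' (s' ++ u) ⟨u, rfl⟩ h1' h2'⟩

-- s prefix of t, s ≤ y ≤ t → s prefix of y
theorem pv_between (s y t : String) (hpre : PySem.Str.startswith t s = true)
    (h1 : s ≤ y) (h2 : y ≤ t) : PySem.Str.startswith y s = true := by
  have hp : s.toList <+: t.toList := by simpa [pysem] using hpre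
  have h1' : ¬ List.Lex (· < ·) y.toList s.toList := by
    have := not_lt.2 h1; rw [String.lt_iff_toList_lt] at this; exact this
  have h2' : ¬ List.Lex (· < ·) t.toList y.toList := by
    have := not_lt.2 h2; rw [String.lt_iff_toList_lt] at this; exact this
  have := pv_between_chars s.toList y.toList t.toList hp h1' h2'
  simpa [pysem] using this

-- two prefixes of the same string: the ≤-smaller is a prefix of the other
theorem pv_chain (a b x' : String) (hab : a ≤ b)
    (ha : PySem.Str.startswith x' a = true) (hb : PySem.Str.startswith x' b = true) :
    PySem.Str.startswith b a = true := by
  have ha' : a.toList <+: x'.toList := by simpa [pysem] using ha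
  have hb' : b.toList <+: x'.toList := by simpa [pysem] using hb
  rcases List.prefix_or_prefix_of_prefix ha' hb' with h | h
  · simpa [pysem] using h
  · by_cases hev : b = a
    · subst hev; simp [pysem]
    · exact absurd (pv_prefix_lt b a h hev) (not_lt.2 hab)

theorem pvDeep_self (x : String) : pvDeep x x = false := by
  simp [pvDeep]


theorem pv_pref_refl (y : String) : PySem.Str.startswith y y = true := by
  simp [pysem]

theorem pv_pref_trans (a b c : String) (h1 : PySem.Str.startswith b a = true)
    (h2 : PySem.Str.startswith c b = true) : PySem.Str.startswith c a = true := by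
  have h1' : a.toList <+: b.toList := by simpa [pysem] using h1
  have h2' : b.toList <+: c.toList := by simpa [pysem] using h2
  simpa [pysem] using h1'.trans h2'

-- ---- generic list facts ----

-- pop loop: pops exactly the leading non-prefix segment
theorem pvPopLoop_eq (x : String) : ∀ (a : List String) (res b : List String),
    (∀ s ∈ a, PySem.Str.startswith x s = false) →
    (∀ s, b.head? = some s → PySem.Str.startswith x s = true) →
    pvPopLoop x res (a ++ b) = (res ++ a, b)
  | [], res, b, _, hb => by
    cases b with
    | nil => simp [pvPopLoop]
    | cons s b' =>
      have h := hb s rfl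
      rw [List.nil_append, List.append_nil]
      simp only [pvPopLoop]
      rw [h]
      simp
  | s :: a', res, b, ha, hb => by
    have hs : PySem.Str.startswith x s = false := ha s (by simp)
    rw [List.cons_append]
    show pvPopLoop x res (s :: (a' ++ b)) = _
    simp only [pvPopLoop]
    rw [hs]
    simpa [List.append_assoc] using
      pvPopLoop_eq x a' (res ++ [s]) b (fun t ht => ha t (by simp [ht])) hb

-- a predicate that only turns off along the list splits it as filter ++ filter-not
theorem pv_split_mono {α : Type} (Q : α → Bool) :
    ∀ (L : List α), L.Pairwise (fun s t => Q t = true → Q s = true) →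
      L = L.filter Q ++ L.filter (fun s => !Q s)
  | [], _ => rfl
  | a :: l, h => by
    rw [List.pairwise_cons] at h
    cases hq : Q a with
    | true =>
      rw [List.filter_cons_of_pos hq, List.filter_cons_of_neg (by simp [hq]), List.cons_append]
      exact congrArg _ (pv_split_mono Q l h.2)
    | false =>
      have hall : ∀ t ∈ l, Q t = false := by
        intro t ht
        cases hqt : Q t with
        | true => exact absurd (h.1 t ht hqt) (by simp [hq])
        | false => rfl
      rw [List.filter_cons_of_neg (by simp [hq]), List.filter_cons_of_pos (by simp [hq]),
        List.filter_eq_nil_iff.2 (fun t ht => by simp [hall t ht]), List.nil_append]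
      have : l.filter (fun s => !Q s) = l := by
        apply List.filter_eq_self.2
        intro t ht; simp [hall t ht]
      rw [this]

-- a filter by a disjunction of disjoint predicates is a permutation of the two filters
theorem pv_filter_or_perm {α : Type} (P Q : α → Bool) :
    ∀ (L : List α), (∀ s ∈ L, ¬(P s = true ∧ Q s = true)) →
      (L.filter (fun s => P s || Q s)).Perm (L.filter P ++ L.filter Q)
  | [], _ => by simp
  | a :: l, h => by
    have ih := pv_filter_or_perm P Q l (fun s hs => h s (by simp [hs]))
    cases hp : P a with
    | true =>
      have hq : Q a = false := by
        cases hQ : Q a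
        · rfl
        · exact absurd ⟨hp, hQ⟩ (h a (by simp))
      simp only [List.filter_cons, hp, hq, Bool.true_or, if_true, if_false,
        Bool.false_eq_true, List.cons_append]
      exact ih.cons a
    | false =>
      cases hq : Q a with
      | true =>
        simp only [List.filter_cons, hp, hq, Bool.false_or, if_true, if_false,
          Bool.false_eq_true]
        exact (ih.cons a).trans List.perm_middle.symm
      | false =>
        simp only [List.filter_cons, hp, hq, Bool.false_or, if_false, Bool.false_eq_true]
        exact ih

-- ---- the invariant ----

theorem pv_inv_step (q : List String) (x' x : String)
    (st : List String × List String × Nat)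
    (hs : ((q ++ [x']) ++ [x]).Pairwise (· ≤ ·))
    (hinv : pvInv (q ++ [x']) x' st) :
    pvInv ((q ++ [x']) ++ [x]) x (pvStepB st x) := by
  obtain ⟨hres, hstack, hsc⟩ := hinv
  set p' := q ++ [x'] with hp'def
  have hx'mem : x' ∈ p' := by simp [hp'def]
  have hp'pw : p'.Pairwise (· ≤ ·) := hs.sublist (List.sublist_append_left _ _)
  have hle_x : ∀ s ∈ p', s ≤ x := by
    intro s hsm
    exact (List.pairwise_append.1 hs).2.2 s hsm x (by simp)
  have hle_x' : ∀ s ∈ p', s ≤ x' := by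
    intro s hsm
    rw [hp'def] at hsm
    rcases List.mem_append.1 hsm with h | h
    · exact (List.pairwise_append.1 hp'pw).2.2 s h x' (by simp)
    · exact le_of_eq (by simpa using h)
  have hmono : ∀ s ∈ p', PySem.Str.startswith x s = true → PySem.Str.startswith x' s = true :=
    fun s hsm h => pv_between s x' x h (hle_x' s hsm) (hle_x x' hx'mem)
  have hcnteq : ∀ s ∈ p', pvAlive p' s = true → PySem.Str.startswith x' s = true →
      PySem.Str.count s "::" = PySem.Str.count x' "::" := by
    intro s hsm halv hpref
    have hd : pvDeep x' s = false := by
      simpa using (List.any_eq_false.1 (by simpa [pvAlive] using halv)) x' hx'mem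
    rw [pvDeep, hpref, Bool.true_and] at hd
    have : PySem.Str.count x' "::" = PySem.Str.count s "::" := by simpa using hd
    exact this.symm
  have halive_app : ∀ s, pvAlive (p' ++ [x]) s = (pvAlive p' s && !pvDeep x s) := by
    intro s; simp [pvAlive]
  have hpx_all : ∀ t ∈ p', pvDeep t x = false := by
    intro t htm
    cases hd : pvDeep t x with
    | false => rfl
    | true =>
      have hxle : x ≤ t := pv_pref_le x t (by
        rw [pvDeep, Bool.and_eq_true] at hd; exact hd.1)
      have htx : t = x := le_antisymm (hle_x t htm) hxle
      exact absurd hd (by rw [htx, pvDeep_self]; simp)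
  have hx_alive : pvAlive (p' ++ [x]) x = true := by
    rw [halive_app, pvDeep_self]
    have : pvAlive p' x = true := by
      simp only [pvAlive, Bool.not_eq_eq_eq_not, Bool.not_true]
      exact List.any_eq_false.2 (fun t ht => by simp [hpx_all t ht])
    simp [this]
  set stF := pvStF p' x' with hstFdef
  have hstFmem : ∀ s ∈ stF, pvAlive p' s = true ∧ PySem.Str.startswith x' s = true := by
    intro s hsm
    simpa using (List.mem_filter.1 hsm).2
  have hstFpw : stF.Pairwise (· ≤ ·) := hp'pw.filter _
  have hchainpw : stF.Pairwise
      (fun s t => PySem.Str.startswith x t = true → PySem.Str.startswith x s = true) := by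
    refine hstFpw.imp_of_mem ?_
    intro a b ha hb hab hQ
    exact pv_pref_trans a b x (pv_chain a b x' hab (hstFmem a ha).2 (hstFmem b hb).2) hQ
  set stP := stF.filter (fun s => PySem.Str.startswith x s) with hstPdef
  set stN := stF.filter (fun s => !PySem.Str.startswith x s) with hstNdef
  have hsplit : stF = stP ++ stN := pv_split_mono _ stF hchainpw
  have hpop : pvPopLoop x st.1 st.2.1 = (st.1 ++ stN.reverse, stP.reverse) := by
    rw [hstack, hsplit, List.reverse_append]
    refine pvPopLoop_eq x stN.reverse st.1 stP.reverse ?_ ?_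
    · intro s hsm
      rw [List.mem_reverse] at hsm
      have := (List.mem_filter.1 hsm).2
      simpa using this
    · intro s hhead
      have hsm := List.mem_of_mem_head? hhead
      rw [List.mem_reverse] at hsm
      exact (List.mem_filter.1 hsm).2
  have hstep : pvStepB st x = (st.1 ++ stN.reverse,
      x :: (if !(stP.reverse).isEmpty
              && (PySem.Str.count x' "::" != PySem.Str.count x "::") then []
            else stP.reverse),
      PySem.Str.count x "::") := by
    simp only [pvStepB, hpop, hsc]
  rw [hstep]
  refine ⟨?_, ?_, rfl⟩
  · -- res component
    show (st.1 ++ stN.reverse).Perm (pvResF (p' ++ [x]) x)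
    have h1 : pvResF (p' ++ [x]) x
        = p'.filter (fun s => pvAlive p' s && !PySem.Str.startswith x s) := by
      rw [pvResF, List.filter_append]
      have hx0 : [x].filter (fun s => pvAlive (p' ++ [x]) s && !PySem.Str.startswith x s)
          = [] := by
        simp [pv_pref_refl x, -PySem.Str.startswith_eq]
      rw [hx0, List.append_nil]
      apply List.filter_congr
      intro s hsm
      cases hpx : PySem.Str.startswith x s with
      | true => simp
      | false =>
        have hd : pvDeep x s = false := by rw [pvDeep, hpx, Bool.false_and]
        simp [halive_app, hd]
    have h2 : p'.filter (fun s => pvAlive p' s && !PySem.Str.startswith x s)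
        = p'.filter (fun s => (pvAlive p' s && !PySem.Str.startswith x' s)
            || ((pvAlive p' s && PySem.Str.startswith x' s) && !PySem.Str.startswith x s)) := by
      apply List.filter_congr
      intro s hsm
      cases hx's : PySem.Str.startswith x' s with
      | false =>
        have hpx : PySem.Str.startswith x s = false := by
          cases hpx0 : PySem.Str.startswith x s with
          | false => rfl
          | true => exact absurd (hmono s hsm hpx0) (by simp [hx's, -PySem.Str.startswith_eq])
        simp [hpx, -PySem.Str.startswith_eq]
      | true => simp
    have h3 := pv_filter_or_perm
      (fun s => pvAlive p' s && !PySem.Str.startswith x' s)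
      (fun s => (pvAlive p' s && PySem.Str.startswith x' s) && !PySem.Str.startswith x s)
      p'
      (by
        intro s _ hcon
        obtain ⟨hP, hQ⟩ := hcon
        simp only [Bool.and_eq_true] at hP hQ
        rcases hP with ⟨-, hP2⟩
        rcases hQ with ⟨⟨-, hQ2⟩, -⟩
        rw [hQ2] at hP2
        exact absurd hP2 (by simp))
    have h4 : p'.filter (fun s => pvAlive p' s && !PySem.Str.startswith x' s) = pvResF p' x' := rfl
    have h5 : p'.filter
        (fun s => (pvAlive p' s && PySem.Str.startswith x' s) && !PySem.Str.startswith x s)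
          = stN := by
      rw [hstNdef, hstFdef, pvStF, List.filter_filter]
      apply List.filter_congr
      intro s _
      cases pvAlive p' s <;> cases PySem.Str.startswith x' s <;>
        cases PySem.Str.startswith x s <;> rfl
    rw [h1, h2]
    refine (hres.append stN.reverse_perm).trans ?_
    rw [h4, h5] at h3
    exact h3.symm
  · -- stack component
    show x :: (if !(stP.reverse).isEmpty
          && (PySem.Str.count x' "::" != PySem.Str.count x "::") then []
        else stP.reverse) = (pvStF (p' ++ [x]) x).reverse
    have hstFnew : pvStF (p' ++ [x]) x
        = p'.filter (fun s => pvAlive (p' ++ [x]) s && PySem.Str.startswith x s) ++ [x] := by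
      rw [pvStF, List.filter_append]
      congr 1
      simp [hx_alive, pv_pref_refl x, -PySem.Str.startswith_eq]
    cases hcase : (PySem.Str.count x' "::" != PySem.Str.count x "::") with
    | true =>
      have hnil : p'.filter (fun s => pvAlive (p' ++ [x]) s && PySem.Str.startswith x s)
          = [] := by
        rw [List.filter_eq_nil_iff]
        intro s hsm
        cases hpx : PySem.Str.startswith x s with
        | false => simp
        | true =>
          cases halv : pvAlive p' s with
          | false => simp [halive_app, halv]
          | true =>
            have hceq := hcnteq s hsm halv (hmono s hsm hpx)
            have hdeep : pvDeep x s = true := by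
              rw [pvDeep, hpx, Bool.true_and, hceq]
              exact bne_iff_ne.2 (Ne.symm (bne_iff_ne.1 hcase))
            simp [halive_app, hdeep]
      rw [hstFnew, hnil, List.nil_append]
      cases hemp : (stP.reverse).isEmpty with
      | true =>
        have : stP.reverse = [] := List.isEmpty_iff.1 hemp
        simp [this]
      | false => simp
    | false =>
      have hceq' : PySem.Str.count x' "::" = PySem.Str.count x "::" := by simpa using hcase
      have hkeep : p'.filter (fun s => pvAlive (p' ++ [x]) s && PySem.Str.startswith x s)
          = stP := by
        rw [hstPdef, hstFdef, pvStF, List.filter_filter]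
        apply List.filter_congr
        intro s hsm
        cases hpx : PySem.Str.startswith x s with
        | false => simp
        | true =>
          cases halv : pvAlive p' s with
          | false => simp [halive_app, halv]
          | true =>
            have hx's := hmono s hsm hpx
            have hceq := hcnteq s hsm halv hx's
            have hdeep : pvDeep x s = false := by
              rw [pvDeep, hpx, Bool.true_and, hceq, hceq']
              simp
            simp [halive_app, halv, hdeep, hx's, -PySem.Str.startswith_eq]
      rw [hstFnew, hkeep, List.reverse_append]
      simp

theorem pv_inv_go : ∀ (rest q : List String) (x' : String)
    (st : List String × List String × Nat),
    ((q ++ [x']) ++ rest).Pairwise (· ≤ ·) → pvInv (q ++ [x']) x' st →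
    ∃ x'', pvInv ((q ++ [x']) ++ rest) x'' (rest.foldl pvStepB st)
  | [], q, x', st, _, hinv => ⟨x', by simpa using hinv⟩
  | x :: rest', q, x', st, hs, hinv => by
    have hsub : ((q ++ [x']) ++ [x]).Pairwise (· ≤ ·) := by
      refine List.Pairwise.sublist ?_ hs
      simp
    have hstep := pv_inv_step q x' x st hsub hinv
    have heq : ((q ++ [x']) ++ [x]) ++ rest' = (q ++ [x']) ++ (x :: rest') := by simp
    have hs' : (((q ++ [x']) ++ [x]) ++ rest').Pairwise (· ≤ ·) := by rw [heq]; exact hs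
    obtain ⟨x'', h⟩ := pv_inv_go rest' (q ++ [x']) x (pvStepB st x) hs' hstep
    rw [heq] at h
    exact ⟨x'', by simpa [List.foldl_cons] using h⟩

theorem pv_inv_first (y : String) : pvInv [y] y (pvStepB ([], [], 0) y) := by
  have hrefc : PySem.Chars.startswith y.toList y.toList = true :=
    (PySem.Chars.startswith_iff _ _).2 (List.prefix_refl _)
  refine ⟨?_, ?_, rfl⟩
  · simp [pvStepB, pvPopLoop, pvResF, pvAlive, hrefc]
  · simp [pvStepB, pvPopLoop, pvStF, pvAlive, pvDeep_self, hrefc]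

-- ===== VERDICT (by name: the statement is the Claim_ definition above) =====
theorem remove_prefix_deck_name_py_spec : Claim_equal_remove_prefix_deck_name_py := by
  intro deck_list _
  unfold Spec_remove_prefix_deck_name_py
  rw [pv_A_eq]
  unfold remove_prefix_deck_name_py_alt
  dsimp only
  have hpw : (PySem.List.sorted deck_list (fun x => x) false).Pairwise (· ≤ ·) :=
    PySem.List.sorted_pairwise deck_list (fun x => x)
  generalize hg : PySem.List.sorted deck_list (fun x => x) false = dl at hpw ⊢
  cases dl with
  | nil => rfl
  | cons y ys =>
    have hpw' : (([] ++ [y]) ++ ys).Pairwise (· ≤ ·) := by simpa using hpw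
    obtain ⟨x'', hin⟩ :=
      pv_inv_go ys [] y (pvStepB ([], [], 0) y) hpw' (by simpa using pv_inv_first y)
    have hlist : ([] ++ [y]) ++ ys = y :: ys := by simp
    rw [hlist] at hin
    obtain ⟨hres, hstack, -⟩ := hin
    have hfoldl : (y :: ys).foldl pvStepB ([], [], 0) = ys.foldl pvStepB (pvStepB ([], [], 0) y) :=
      List.foldl_cons ..
    set st := ys.foldl pvStepB (pvStepB ([], [], 0) y) with hstdef
    rw [hfoldl]
    -- the filter by aliveness splits along 'prefix of x''' into B's res and stack parts
    have h2 : (y :: ys).filter (fun s => pvAlive (y :: ys) s)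
        = (y :: ys).filter (fun s => (pvAlive (y :: ys) s && !PySem.Str.startswith x'' s)
            || (pvAlive (y :: ys) s && PySem.Str.startswith x'' s)) := by
      apply List.filter_congr
      intro s _
      cases pvAlive (y :: ys) s <;> cases PySem.Str.startswith x'' s <;> rfl
    have h3 := pv_filter_or_perm
      (fun s => pvAlive (y :: ys) s && !PySem.Str.startswith x'' s)
      (fun s => pvAlive (y :: ys) s && PySem.Str.startswith x'' s)
      (y :: ys)
      (by
        intro s _ hcon
        obtain ⟨hP, hQ⟩ := hcon
        simp only [Bool.and_eq_true] at hP hQ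
        rw [hQ.2] at hP
        exact absurd hP.2 (by simp))
    have hp : ((y :: ys).filter (fun s => pvAlive (y :: ys) s)).Perm
        (st.1 ++ st.2.1.reverse) := by
      rw [h2]
      refine h3.trans ?_
      refine List.Perm.append hres.symm ?_
      rw [hstack, List.reverse_reverse]
      exact List.Perm.refl _
    exact PySem.List.sorted_eq_sorted_of_perm _ _ _ (fun a b h => h) hp
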